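-- pv_equiv track=rewrite | github.com/TestProjectAutomation/education_platform | articles/views.py | insert_ads_in_content
-- ===== SOURCE A (Python) =====
-- def insert_ads_in_content(content, ads):
--     """إدراج الإعلانات داخل المحتوى"""
--     if not ads:
--         return content
--
--     paragraphs = content.split('\n\n')
--     total_paragraphs = len(paragraphs)
--
--     # لا ندرج إعلانات إذا كان المحتوى قصيراً
--     if total_paragraphs < 5:
--         return content
--
--     # تحديد أماكن الإعلانات
--     ad_positions = []
--
--     # أول إعلان بعد الفقرة الثانية
--     if total_paragraphs > 3:
--         ad_positions.append(2)
--
--     # إعلان ثاني قبل الفقرة قبل الأخيرة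
--     if total_paragraphs > 7:
--         ad_positions.append(total_paragraphs - 2)
--
--     # إدراج الإعلانات
--     result_paragraphs = []
--     ad_index = 0
--
--     for i, paragraph in enumerate(paragraphs):
--         result_paragraphs.append(paragraph)
--
--         if i in ad_positions and ad_index < len(ads):
--             result_paragraphs.append(
--                 f'<div class="in-content-ad ad-position-{ad_index + 1}">'
--                 f'{ads[ad_index]["html"]}'
--                 f'</div>'
--             )
--             ad_index += 1
--
--     return '\n\n'.join(result_paragraphs)
-- ===== SOURCE B (Python) =====
-- def insert_ads_in_content(content, ads):
--     """Build the result by slicing: concatenate paragraph segments around the divs."""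
--     if not ads:
--         return content
--
--     paragraphs = content.split('\n\n')
--     n = len(paragraphs)
--
--     if n < 5:
--         return content
--
--     def div(j):
--         return f'<div class="in-content-ad ad-position-{j + 1}">{ads[j]["html"]}</div>'
--
--     if n > 7 and len(ads) >= 2:
--         parts = paragraphs[:3] + [div(0)] + paragraphs[3:n - 1] + [div(1)] + paragraphs[n - 1:]
--     else:
--         parts = paragraphs[:3] + [div(0)] + paragraphs[3:]
--     return '\n\n'.join(parts)
-- ===== Notes on version B (the rewrite author's own statement) =====
-- stated objective: alternative
-- what changed: B replaces A's stateful scan over every paragraph (membership test in ad_positions plus an ad counter) by direct list slicing: it concatenates paragraphs[:3] + first div + the middle slice (+ second div + the last paragraph when there are >7 paragraphs and >=2 ads) and joins that.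
import Mathlib
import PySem

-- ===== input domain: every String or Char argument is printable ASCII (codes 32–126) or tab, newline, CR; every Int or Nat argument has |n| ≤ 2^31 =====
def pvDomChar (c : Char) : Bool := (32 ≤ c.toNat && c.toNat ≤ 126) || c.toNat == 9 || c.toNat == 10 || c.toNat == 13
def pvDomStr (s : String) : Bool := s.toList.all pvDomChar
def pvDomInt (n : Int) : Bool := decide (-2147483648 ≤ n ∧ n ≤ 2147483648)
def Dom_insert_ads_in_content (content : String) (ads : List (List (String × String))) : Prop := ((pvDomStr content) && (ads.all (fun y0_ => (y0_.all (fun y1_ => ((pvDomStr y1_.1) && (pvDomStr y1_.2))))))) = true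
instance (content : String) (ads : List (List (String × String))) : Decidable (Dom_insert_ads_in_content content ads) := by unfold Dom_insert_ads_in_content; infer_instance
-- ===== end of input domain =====

-- B builds the result directly by slicing: prefix + first div + middle slice (+ second div + last
-- paragraph when it applies), instead of A's stateful scan over every paragraph (alternative decomposition).

-- ===== PORT A =====
-- the f-string '<div class="in-content-ad ad-position-{k+1}">{ads[k]["html"]}</div>'
def pvAdDivA (ads : List (List (String × String))) (k : Int) : String :=
  "<div class=\"in-content-ad ad-position-" ++ PySem.Int.toStr (k + 1) ++ "\">"
    ++ (PySem.Dict.get? (PySem.Dict.ofList ((PySem.List.pyGet? ads k).getD [])) "html").getD ""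
    ++ "</div>"

-- ad_positions: [] ; append 2 if total > 3 ; append total-2 if total > 7
def pvAdPositionsA (n : Nat) : List Int :=
  (if n > 3 then [(2 : Int)] else []) ++ (if n > 7 then [(n : Int) - 2] else [])

-- the body of A's 'for i, paragraph in enumerate(paragraphs)' loop
def pvStepA (ad_positions : List Int) (ads : List (List (String × String)))
    (st : List String × Int) (pr : Int × String) : List String × Int :=
  if pr.1 ∈ ad_positions ∧ st.2 < (ads.length : Int) then
    (st.1 ++ [pr.2] ++ [pvAdDivA ads st.2], st.2 + 1)
  else
    (st.1 ++ [pr.2], st.2)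

def insert_ads_in_content (content : String) (ads : List (List (String × String))) : String :=
  if ads = [] then content
  else if ((PySem.Str.split? content "\n\n").getD []).length < 5 then content
  else
    PySem.Str.join "\n\n"
      (((PySem.List.enumerate ((PySem.Str.split? content "\n\n").getD []) 0).foldl
          (pvStepA (pvAdPositionsA ((PySem.Str.split? content "\n\n").getD []).length) ads)
          ([], 0)).1)

-- ===== PORT B =====
-- B's local 'div(j)'
def pvDivB (ads : List (List (String × String))) (j : Int) : String :=
  "<div class=\"in-content-ad ad-position-" ++ PySem.Int.toStr (j + 1) ++ "\">"
    ++ (PySem.Dict.get? (PySem.Dict.ofList ((PySem.List.pyGet? ads j).getD [])) "html").getD ""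
    ++ "</div>"

-- B's slice-and-concatenate body: paragraphs[:3] + [div(0)] + paragraphs[3:n-1] + [div(1)] + paragraphs[n-1:]
-- (two-ad branch) or paragraphs[:3] + [div(0)] + paragraphs[3:] (otherwise)
def pvPartsB (paragraphs : List String) (ads : List (List (String × String))) : List String :=
  if 7 < paragraphs.length ∧ 2 ≤ ads.length then
    PySem.List.slice paragraphs none (some 3) ++ [pvDivB ads 0]
      ++ PySem.List.slice paragraphs (some 3) (some ((paragraphs.length : Int) - 1))
      ++ [pvDivB ads 1]
      ++ PySem.List.slice paragraphs (some ((paragraphs.length : Int) - 1)) none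
  else
    PySem.List.slice paragraphs none (some 3) ++ [pvDivB ads 0]
      ++ PySem.List.slice paragraphs (some 3) none

def insert_ads_in_content_alt (content : String) (ads : List (List (String × String))) : String :=
  if ads = [] then content
  else if ((PySem.Str.split? content "\n\n").getD []).length < 5 then content
  else
    PySem.Str.join "\n\n" (pvPartsB ((PySem.Str.split? content "\n\n").getD []) ads)

-- ===== PRECONDITION & SPEC =====
-- Pre_ excludes exactly the inputs on which A raises KeyError: an ad dict actually consulted
-- by the loop (the first ad, and the second when there are more than 7 paragraphs) lacks "html".
def Pre_insert_ads_in_content (content : String) (ads : List (List (String × String))) : Prop :=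
  ads = [] ∨ ((PySem.Str.split? content "\n\n").getD []).length < 5 ∨
    ((ads.take (if 7 < ((PySem.Str.split? content "\n\n").getD []).length then 2 else 1)).all
      (fun ad => (PySem.Dict.get? (PySem.Dict.ofList ad) "html").isSome)) = true

instance (content : String) (ads : List (List (String × String))) : Decidable (Pre_insert_ads_in_content content ads) := by
  unfold Pre_insert_ads_in_content; infer_instance

def pvWitness_insert_ads_in_content : String × (List (List (String × String))) :=
  ("a\n\nb\n\nc\n\nd\n\ne", [[("html", "AD")]])

def Spec_insert_ads_in_content (content : String) (ads : List (List (String × String))) (out : String) : Prop := out = insert_ads_in_content_alt content ads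
instance (content : String) (ads : List (List (String × String))) (out : String) : Decidable (Spec_insert_ads_in_content content ads out) := by unfold Spec_insert_ads_in_content; infer_instance

-- ===== CLAIM (what is proved, stated in full; the proofs are below) =====
def Claim_equal_insert_ads_in_content : Prop := ∀ (content : String) (ads : List (List (String × String))), Dom_insert_ads_in_content content ads → Pre_insert_ads_in_content content ads → Spec_insert_ads_in_content content ads (insert_ads_in_content content ads)

-- ===== LEMMAS AND PROOFS =====

theorem pvStepA_miss (pos : List Int) (ads : List (List (String × String)))
    (acc : List String) (ai i : Int) (x : String) (h : i ∉ pos) :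
    pvStepA pos ads (acc, ai) (i, x) = (acc ++ [x], ai) := by
  simp [pvStepA, h]

theorem pvStepA_sat1 (pos : List Int) (ads : List (List (String × String)))
    (acc : List String) (ai i : Int) (x : String) (h : ¬ ai < (ads.length : Int)) :
    pvStepA pos ads (acc, ai) (i, x) = (acc ++ [x], ai) := by
  simp [pvStepA, h]

theorem pvStepA_hit (pos : List Int) (ads : List (List (String × String)))
    (acc : List String) (ai i : Int) (x : String)
    (h1 : i ∈ pos) (h2 : ai < (ads.length : Int)) :
    pvStepA pos ads (acc, ai) (i, x) = (acc ++ [x] ++ [pvAdDivA ads ai], ai + 1) := by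
  simp [pvStepA, h1, h2]

-- A's loop over a segment whose indices hit no ad position just appends the paragraphs
theorem pvStepA_skip (pos : List Int) (ads : List (List (String × String))) :
    ∀ (rest : List String) (start : Int) (acc : List String) (ai : Int),
      (∀ k : Nat, k < rest.length → (start + (k : Int)) ∉ pos) →
      (PySem.List.enumerate rest start).foldl (pvStepA pos ads) (acc, ai)
        = (acc ++ rest, ai) := by
  intro rest
  induction rest with
  | nil => intro start acc ai _; simp [PySem.List.enumerate_nil]
  | cons x xs ih =>
    intro start acc ai h
    have h0 : start ∉ pos := by simpa using h 0 (by simp)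
    rw [PySem.List.enumerate_cons, List.foldl_cons, pvStepA_miss pos ads acc ai start x h0,
      ih (start + 1) (acc ++ [x]) ai ?_]
    · simp
    · intro k hk
      have hh := h (k + 1) (by simpa using Nat.succ_lt_succ hk)
      have e : start + ((k + 1 : Nat) : Int) = start + 1 + (k : Int) := by push_cast; ring
      rwa [e] at hh

-- once all ads are used, A's loop just appends the paragraphs
theorem pvStepA_satAll (pos : List Int) (ads : List (List (String × String))) :
    ∀ (rest : List String) (start : Int) (acc : List String) (ai : Int),
      (ads.length : Int) ≤ ai →
      (PySem.List.enumerate rest start).foldl (pvStepA pos ads) (acc, ai)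
        = (acc ++ rest, ai) := by
  intro rest
  induction rest with
  | nil => intro start acc ai _; simp [PySem.List.enumerate_nil]
  | cons x xs ih =>
    intro start acc ai h
    rw [PySem.List.enumerate_cons, List.foldl_cons,
      pvStepA_sat1 pos ads acc ai start x (by omega),
      ih (start + 1) (acc ++ [x]) ai h]
    simp

theorem pvTakeLeft {α : Type} (l₁ l₂ : List α) : (l₁ ++ l₂).take l₁.length = l₁ := by
  induction l₁ with
  | nil => rfl
  | cons a t ih => simp [ih]

theorem pvDropLeft {α : Type} (l₁ l₂ : List α) : (l₁ ++ l₂).drop l₁.length = l₂ := by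
  induction l₁ with
  | nil => rfl
  | cons a t ih => simp [ih]

-- the core equivalence on the paragraph list (guards already passed)
theorem pvMain (ads : List (List (String × String))) (hads : ads ≠ [])
    (p : List String) (h5 : 5 ≤ p.length) :
    ((PySem.List.enumerate p 0).foldl (pvStepA (pvAdPositionsA p.length) ads) ([], 0)).1
      = pvPartsB p ads := by
  have hadsl : 1 ≤ ads.length := List.length_pos_of_ne_nil hads
  rcases p with _ | ⟨a0, p⟩; · simp at h5
  rcases p with _ | ⟨a1, p⟩; · simp at h5
  rcases p with _ | ⟨a2, rest⟩; · simp at h5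
  have hrl : 2 ≤ rest.length := by simp at h5; omega
  have hlen : (a0 :: a1 :: a2 :: rest).length = rest.length + 3 := by
    simp only [List.length_cons]
  by_cases hshort : rest.length ≤ 4
  · -- at most 7 paragraphs: one ad position [2], B's else branch
    have hpos : pvAdPositionsA (a0 :: a1 :: a2 :: rest).length = [(2 : Int)] := by
      unfold pvAdPositionsA
      rw [hlen, if_pos (by omega), if_neg (by omega)]; rfl
    rw [hpos, PySem.List.enumerate_cons, PySem.List.enumerate_cons, PySem.List.enumerate_cons,
      List.foldl_cons, List.foldl_cons, List.foldl_cons,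
      pvStepA_miss [(2 : Int)] ads [] 0 0 a0 (by decide),
      pvStepA_miss [(2 : Int)] ads ([] ++ [a0]) 0 (0 + 1) a1 (by decide),
      pvStepA_hit [(2 : Int)] ads ([] ++ [a0] ++ [a1]) 0 (0 + 1 + 1) a2 (by decide)
        (by exact_mod_cast hadsl),
      pvStepA_skip [(2 : Int)] ads rest (0 + 1 + 1 + 1)
        ([] ++ [a0] ++ [a1] ++ [a2] ++ [pvAdDivA ads 0]) (0 + 1)
        (by intro k hk; simp; omega)]
    unfold pvPartsB
    rw [if_neg (by rw [hlen]; omega),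
      PySem.List.slice_to _ (by norm_num : (0:Int) ≤ 3),
      PySem.List.slice_from _ (by norm_num : (0:Int) ≤ 3)]
    simp [pvAdDivA, pvDivB]
  · -- more than 7 paragraphs
    have hrl5 : 5 ≤ rest.length := by omega
    by_cases hone : ads.length = 1
    · -- only one ad: the second position never fires; B's else branch again
      have hpos : pvAdPositionsA (a0 :: a1 :: a2 :: rest).length
          = [(2 : Int), (rest.length : Int) + 1] := by
        unfold pvAdPositionsA
        rw [hlen, if_pos (by omega), if_pos (by omega),
          show ((rest.length + 3 : Nat) : Int) - 2 = (rest.length : Int) + 1 from by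
            push_cast; ring]
        rfl
      rw [hpos, PySem.List.enumerate_cons, PySem.List.enumerate_cons, PySem.List.enumerate_cons,
        List.foldl_cons, List.foldl_cons, List.foldl_cons,
        pvStepA_miss [(2 : Int), (rest.length : Int) + 1] ads [] 0 0 a0 (by simp; omega),
        pvStepA_miss [(2 : Int), (rest.length : Int) + 1] ads ([] ++ [a0]) 0 (0 + 1) a1
          (by simp; exact List.ne_nil_of_length_pos (by omega)),
        pvStepA_hit [(2 : Int), (rest.length : Int) + 1] ads ([] ++ [a0] ++ [a1]) 0 (0 + 1 + 1) a2 (by simp)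
          (by exact_mod_cast hadsl),
        pvStepA_satAll [(2 : Int), (rest.length : Int) + 1] ads rest (0 + 1 + 1 + 1)
          ([] ++ [a0] ++ [a1] ++ [a2] ++ [pvAdDivA ads 0]) (0 + 1) (by omega)]
      unfold pvPartsB
      rw [if_neg (by omega),
        PySem.List.slice_to _ (by norm_num : (0:Int) ≤ 3),
        PySem.List.slice_from _ (by norm_num : (0:Int) ≤ 3)]
      simp [pvAdDivA, pvDivB]
    · -- at least two ads and more than 7 paragraphs: both positions fire, B's two-ad branch
      have hads2 : 2 ≤ ads.length := by omega
      obtain ⟨mid, y, z, rfl⟩ : ∃ mid y z, rest = mid ++ [y, z] := by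
        rcases hr3 : rest.reverse with _ | ⟨z, t⟩
        · have h0 : rest = [] := by simpa using congrArg List.reverse hr3
          rw [h0] at hrl5; simp at hrl5
        rcases t with _ | ⟨y, mr⟩
        · have h0 : rest = [z] := by simpa using congrArg List.reverse hr3
          rw [h0] at hrl5; simp at hrl5
        · refine ⟨mr.reverse, y, z, ?_⟩
          have h0 := congrArg List.reverse hr3
          simpa using h0
      have hmlen : (mid ++ [y, z]).length = mid.length + 2 := by
        simp only [List.length_append, List.length_cons, List.length_nil]
      rw [hmlen] at hrl5 hshort
      have hlen' : (a0 :: a1 :: a2 :: (mid ++ [y, z])).length = mid.length + 5 := by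
        rw [hlen, hmlen]
      have hpos : pvAdPositionsA (a0 :: a1 :: a2 :: (mid ++ [y, z])).length
          = [(2 : Int), (mid.length : Int) + 3] := by
        unfold pvAdPositionsA
        rw [hlen', if_pos (by omega), if_pos (by omega),
          show ((mid.length + 5 : Nat) : Int) - 2 = (mid.length : Int) + 3 from by
            push_cast; ring]
        rfl
      rw [hpos, PySem.List.enumerate_cons, PySem.List.enumerate_cons, PySem.List.enumerate_cons,
        List.foldl_cons, List.foldl_cons, List.foldl_cons,
        pvStepA_miss [(2 : Int), (mid.length : Int) + 3] ads [] 0 0 a0 (by simp; omega),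
        pvStepA_miss [(2 : Int), (mid.length : Int) + 3] ads ([] ++ [a0]) 0 (0 + 1) a1
          (by simp; omega),
        pvStepA_hit [(2 : Int), (mid.length : Int) + 3] ads ([] ++ [a0] ++ [a1]) 0 (0 + 1 + 1) a2
          (by simp) (by exact_mod_cast hadsl),
        PySem.List.enumerate_append, List.foldl_append,
        pvStepA_skip [(2 : Int), (mid.length : Int) + 3] ads mid (0 + 1 + 1 + 1)
          ([] ++ [a0] ++ [a1] ++ [a2] ++ [pvAdDivA ads 0]) (0 + 1)
          (by intro k hk; simp; omega)]
      rw [PySem.List.enumerate_cons, PySem.List.enumerate_cons, PySem.List.enumerate_nil,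
        List.foldl_cons, List.foldl_cons, List.foldl_nil,
        pvStepA_hit [(2 : Int), (mid.length : Int) + 3] ads
          (([] ++ [a0] ++ [a1] ++ [a2] ++ [pvAdDivA ads 0]) ++ mid) (0 + 1)
          (0 + 1 + 1 + 1 + (mid.length : Int)) y (by simp; omega) (by omega),
        pvStepA_miss [(2 : Int), (mid.length : Int) + 3] ads
          (([] ++ [a0] ++ [a1] ++ [a2] ++ [pvAdDivA ads 0]) ++ mid ++ [y]
            ++ [pvAdDivA ads (0 + 1)]) (0 + 1 + 1)
          (0 + 1 + 1 + 1 + (mid.length : Int) + 1) z (by simp; omega)]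
      unfold pvPartsB
      rw [if_pos ⟨by rw [hlen']; omega, hads2⟩, hlen',
        show ((mid.length + 5 : Nat) : Int) - 1 = ((mid.length + 4 : Nat) : Int) from by
          push_cast; ring,
        PySem.List.slice_to _ (by norm_num : (0:Int) ≤ 3),
        PySem.List.slice_toNat _ (by norm_num : (0:Int) ≤ 3)
          (by positivity : (0:Int) ≤ ((mid.length + 4 : Nat) : Int)),
        PySem.List.slice_from _ (by positivity : (0:Int) ≤ ((mid.length + 4 : Nat) : Int))]
      have hdropmid : List.drop ((3:Int).toNat) (a0 :: a1 :: a2 :: (mid ++ [y, z]))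
          = mid ++ [y, z] := rfl
      have hmidy : List.take (((mid.length + 4 : Nat) : Int).toNat - (3:Int).toNat)
          (mid ++ [y, z]) = mid ++ [y] := by
        rw [Int.toNat_natCast, show (3:Int).toNat = 3 from rfl,
          show mid.length + 4 - 3 = (mid ++ [y]).length from by simp,
          show mid ++ [y, z] = (mid ++ [y]) ++ [z] from by simp,
          pvTakeLeft]
      have hlastz : List.drop (((mid.length + 4 : Nat) : Int).toNat)
          (a0 :: a1 :: a2 :: (mid ++ [y, z])) = [z] := by
        rw [Int.toNat_natCast,
          show a0 :: a1 :: a2 :: (mid ++ [y, z])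
              = (a0 :: a1 :: a2 :: (mid ++ [y])) ++ [z] from by simp,
          show mid.length + 4 = (a0 :: a1 :: a2 :: (mid ++ [y])).length from by simp,
          pvDropLeft]
      rw [hdropmid, hmidy, hlastz]
      simp [pvAdDivA, pvDivB, List.append_assoc]

-- ===== VERDICT (by name: the statement is the Claim_ definition above) =====
theorem insert_ads_in_content_spec : Claim_equal_insert_ads_in_content := by
  intro content ads _ _
  unfold Spec_insert_ads_in_content insert_ads_in_content insert_ads_in_content_alt
  by_cases hads : ads = []
  · simp [hads]
  rw [if_neg hads, if_neg hads]
  by_cases h5 : ((PySem.Str.split? content "\n\n").getD []).length < 5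
  · rw [if_pos h5, if_pos h5]
  · rw [if_neg h5, if_neg h5]
    exact congrArg _ (pvMain ads hads _ (by omega))
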